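-- pv_equiv track=rewrite | github.com/rotated8/advent-of-code-2025 | day03/main.py | bank
-- ===== SOURCE A (Python) =====
-- def bank(line):
--     for i in reversed(range(10)):
--         idx = line.find(str(i))
--         if idx != -1 and idx != len(line)-1:
--             subline = line[idx+1:]
--             for j in reversed(range(10)):
--                 jdx = subline.find(str(j))
--                 if jdx != -1:
--                     return int(f"{i}{j}")
-- ===== SOURCE B (Python) =====
-- def bank(line):
--     first = {}
--     last = -1
--     for k, ch in enumerate(line):
--         if '0' <= ch <= '9':
--             d = ord(ch) - 48
--             if d not in first:
--                 first[d] = k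
--             last = k
--     tens = None
--     for d in range(9, -1, -1):
--         if d in first and first[d] < last:
--             tens = d
--             break
--     if tens is None:
--         return None
--     units = max(ord(c) - 48 for c in line[first[tens] + 1:] if '0' <= c <= '9')
--     return tens * 10 + units
-- ===== Notes on version B (the rewrite author's own statement) =====
-- stated objective: alternative
-- what changed: A scans the whole string up to 10 times with str.find (each hit followed by up to 10 more find sweeps over the suffix); B does one forward pass recording every digit's first-occurrence index and the last digit's index, then picks the tens digit from that table and takes one max pass over the suffix for the units digit.
import Mathlib
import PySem

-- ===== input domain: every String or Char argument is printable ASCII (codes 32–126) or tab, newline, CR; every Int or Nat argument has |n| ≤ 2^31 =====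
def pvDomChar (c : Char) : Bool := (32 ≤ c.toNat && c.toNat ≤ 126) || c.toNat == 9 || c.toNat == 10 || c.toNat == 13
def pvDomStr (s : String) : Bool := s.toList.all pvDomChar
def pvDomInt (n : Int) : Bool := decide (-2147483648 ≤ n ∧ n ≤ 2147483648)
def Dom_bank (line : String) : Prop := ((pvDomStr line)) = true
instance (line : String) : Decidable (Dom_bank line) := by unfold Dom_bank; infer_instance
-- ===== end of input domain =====

-- B replaces A's repeated `.find` sweeps over the string by a single forward pass that
-- records each digit's first index and the last digit's index (objective: alternative).

-- ===== PORT A =====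
-- inner loop: `for j in reversed(range(10)): ...`
-- (int(f"{i}{j}") is ported as PySem.Int.ofStr? of the concatenated str()s; it is
-- always `some` here since both pieces are digits, so Option none never escapes)
def bankInner (subline : String) (i : Int) : List Int → Option Int
  | [] => none
  | j :: rest =>
    if PySem.Str.find subline (PySem.Int.toStr j) ≠ -1 then
      PySem.Int.ofStr? (PySem.Int.toStr i ++ PySem.Int.toStr j)
    else bankInner subline i rest

-- outer loop: `for i in reversed(range(10)): ...`
def bankOuter (line : String) : List Int → Option Int
  | [] => none
  | i :: rest =>
    let idx := PySem.Str.find line (PySem.Int.toStr i)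
    if idx ≠ -1 ∧ idx ≠ PySem.Str.len line - 1 then
      match bankInner (PySem.Str.slice line (some (idx + 1)) none) i
          (PySem.List.pyRange 9 (-1) (-1)) with
      | some v => some v
      | none => bankOuter line rest
    else bankOuter line rest

def bank (line : String) : Option Int :=
  bankOuter line (PySem.List.pyRange 9 (-1) (-1))

-- ===== PORT B =====
-- `for d in range(9, -1, -1): if d in first and first[d] < last: tens = d; break`
def bankTens (first : PySem.Dict Int Int) (last : Int) : List Int → Option Int
  | [] => none
  | d :: rest =>
    match first.get? d with
    | some k => if k < last then some d else bankTens first last rest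
    | none => bankTens first last rest

-- the code after the tens loop: `units = max(...)` and the final return
-- (first[tens] would be a KeyError if absent and max() a ValueError on an empty
-- generator; both are unreachable in B, the port returns none there)
def bankUnits (line : String) (first : PySem.Dict Int Int) (t : Int) : Option Int :=
  match first.get? t with
  | none => none
  | some k =>
    match PySem.List.max?
        (((PySem.Str.slice line (some (k + 1)) none).toList.filter
            (fun c => decide ('0' ≤ c ∧ c ≤ '9'))).map
          (fun c => ((c.toNat : Int) - 48))) (fun x => x) with
    | none => none
    | some u => some (t * 10 + u)

def bank_alt (line : String) : Option Int :=
  let scan := (PySem.List.enumerate line.toList 0).foldl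
    (fun (acc : PySem.Dict Int Int × Int) kc =>
      if '0' ≤ kc.2 ∧ kc.2 ≤ '9' then
        (if acc.1.contains ((kc.2.toNat : Int) - 48) then acc.1
         else acc.1.insert ((kc.2.toNat : Int) - 48) kc.1, kc.1)
      else acc)
    (PySem.Dict.empty, -1)
  match bankTens scan.1 scan.2 (PySem.List.pyRange 9 (-1) (-1)) with
  | none => none
  | some t => bankUnits line scan.1 t

-- ===== PRECONDITION & SPEC =====
def Spec_bank (line : String) (out : Option Int) : Prop := out = bank_alt line
instance (line : String) (out : Option Int) : Decidable (Spec_bank line out) := by unfold Spec_bank; infer_instance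

-- ===== CLAIM (what is proved, stated in full; the proofs are below) =====
def Claim_equal_bank : Prop := ∀ (line : String), Dom_bank line → Spec_bank line (bank line)

-- ===== LEMMAS AND PROOFS =====

/-- ASCII digit test, as B writes it. -/
def isDig (c : Char) : Bool := decide ('0' ≤ c ∧ c ≤ '9')

/-- value of a digit character. -/
def dval (c : Char) : Int := (c.toNat : Int) - 48

/-- the character of digit `d` (for `0 ≤ d ≤ 9`). -/
def dchar (d : Int) : Char := Char.ofNat (48 + d.toNat)

/-- the digit values occurring in `cs`, in order. -/
def digitsOf (cs : List Char) : List Int :=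
  (cs.filter isDig).map (fun c => ((c.toNat : Int) - 48))

/-- index of the first occurrence of digit `d` in `cs`. -/
def fIdx (d : Int) (cs : List Char) : Option Nat := cs.findIdx? (· == dchar d)

/-- index of the last ASCII digit in `cs`, `-1` if none. -/
def lastIdx (cs : List Char) : Int :=
  match cs.reverse.findIdx? isDig with
  | some j => (cs.length : Int) - 1 - j
  | none => -1

lemma toStr_digit (d : Int) (h0 : 0 ≤ d) (h9 : d ≤ 9) :
    (PySem.Int.toStr d).toList = [dchar d] := by
  interval_cases d <;> decide

lemma isDig_iff (c : Char) : isDig c = true ↔ 48 ≤ c.toNat ∧ c.toNat ≤ 57 := by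
  unfold isDig
  rw [decide_eq_true_iff, Char.le_def, Char.le_def, UInt32.le_iff_toNat_le, UInt32.le_iff_toNat_le]
  constructor <;> intro h <;> exact ⟨h.1, h.2⟩


lemma dchar_dval (c : Char) (h : isDig c = true) : dchar ((c.toNat : Int) - 48) = c := by
  rw [isDig_iff] at h
  unfold dchar
  have : (48 + ((c.toNat : Int) - 48).toNat) = c.toNat := by omega
  rw [this, Char.ofNat_toNat]


lemma isDig_dchar (d : Int) (h0 : 0 ≤ d) (h9 : d ≤ 9) : isDig (dchar d) = true := by
  interval_cases d <;> decide

lemma dval_dchar (d : Int) (h0 : 0 ≤ d) (h9 : d ≤ 9) : ((dchar d).toNat : Int) - 48 = d := by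
  interval_cases d <;> decide

lemma mem_digitsOf (d : Int) (h0 : 0 ≤ d) (h9 : d ≤ 9) (cs : List Char) :
    d ∈ digitsOf cs ↔ dchar d ∈ cs := by
  unfold digitsOf
  simp only [List.mem_map, List.mem_filter]
  constructor
  · rintro ⟨c, ⟨hc, hd⟩, rfl⟩
    rwa [dchar_dval c hd]
  · intro h
    exact ⟨dchar d, ⟨h, isDig_dchar d h0 h9⟩, dval_dchar d h0 h9⟩


lemma digitsOf_bounds (cs : List Char) : ∀ x ∈ digitsOf cs, 0 ≤ x ∧ x < 10 := by
  unfold digitsOf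
  simp only [List.mem_map, List.mem_filter]
  rintro x ⟨c, ⟨_, hd⟩, rfl⟩
  rw [isDig_iff] at hd
  omega


lemma prefix_singleton (c : Char) (l : List Char) : [c] <+: l ↔ l.head? = some c := by
  cases l with
  | nil => simp
  | cons x t => simp [List.cons_prefix_cons, eq_comm]

lemma find_singleton (cs : List Char) (c : Char) :
    PySem.Chars.find cs [c] =
      (match cs.findIdx? (· == c) with
       | some k => (k : Int)
       | none => -1) := by
  cases h : cs.findIdx? (· == c) with
  | none =>
    rw [List.findIdx?_eq_none_iff] at h
    rw [PySem.Chars.find_eq_neg_one_iff, List.singleton_infix_iff]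
    intro hc
    simpa using h c hc
  | some k =>
    rw [List.findIdx?_eq_some_iff_getElem] at h
    obtain ⟨hk, hpk, hmin⟩ := h
    have hck : cs[k] = c := by simpa using hpk
    have hmem : c ∈ cs := hck ▸ List.getElem_mem hk
    have hnn : 0 ≤ PySem.Chars.find cs [c] := by
      rw [PySem.Chars.find_nonneg_iff, List.singleton_infix_iff]; exact hmem
    obtain ⟨hpre, hfmin⟩ := PySem.Chars.find_spec hnn
    set F := (PySem.Chars.find cs [c]).toNat with hF
    have hFk : F = k := by
      rcases Nat.lt_trichotomy F k with h1 | h1 | h1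
      · exfalso
        have : cs[F]? = some c := by
          rw [← List.head?_drop]
          exact (prefix_singleton c _).mp hpre
        have hFl : F < cs.length := by
          have := List.getElem?_eq_some_iff.mp this
          exact this.1
        have : cs[F] = c := by
          have h2 := this
          rw [List.getElem?_eq_getElem hFl] at h2
          exact Option.some.inj h2
        exact absurd (by simp [this]) (hmin F h1)
      · exact h1
      · exfalso
        apply hfmin k h1
        rw [prefix_singleton, List.head?_drop, List.getElem?_eq_getElem hk, hck]
    have : PySem.Chars.find cs [c] = (F : Int) := (Int.toNat_of_nonneg hnn).symm
    rw [this, hFk]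


lemma max?_unique (l : List Int) (m : Int) (hm : m ∈ l) (hmax : ∀ x ∈ l, x ≤ m) :
    PySem.List.max? l (fun x => x) = some m := by
  cases h : PySem.List.max? l (fun x => x) with
  | none =>
    rw [PySem.List.max?_eq_none_iff] at h
    subst h; cases hm
  | some m' =>
    have h1 : m' ∈ l := PySem.List.max?_mem h
    have h2 : m ≤ m' := PySem.List.max?_isMax h m hm
    have h3 : m' ≤ m := hmax m' h1
    rw [le_antisymm h2 h3]


lemma ofStr_two (i j : Int) (hi0 : 0 ≤ i) (hi9 : i ≤ 9) (hj0 : 0 ≤ j) (hj9 : j ≤ 9) :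
    PySem.Int.ofStr? (PySem.Int.toStr i ++ PySem.Int.toStr j) = some (i * 10 + j) := by
  interval_cases i <;> interval_cases j <;> decide

lemma fIdx_some (d : Int) (cs : List Char) (k : Nat) (h : fIdx d cs = some k) :
    ∃ hk : k < cs.length, cs[k] = dchar d := by
  unfold fIdx at h
  rw [List.findIdx?_eq_some_iff_getElem] at h
  obtain ⟨hk, hp, _⟩ := h
  exact ⟨hk, by simpa using hp⟩

lemma fIdx_none (d : Int) (cs : List Char) (h : fIdx d cs = none) : dchar d ∉ cs := by
  unfold fIdx at h
  rw [List.findIdx?_eq_none_iff] at h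
  intro hm
  simpa using h _ hm

lemma digitsOf_ne_nil (l : List Char) : digitsOf l ≠ [] ↔ ∃ c ∈ l, isDig c = true := by
  unfold digitsOf
  simp [List.filter_eq_nil_iff]

lemma inner_eq (s : String) (i : Int) (hi0 : 0 ≤ i) (hi9 : i ≤ 9) :
    ∀ n : Nat, n ≤ 10 →
    bankInner s i (PySem.List.pyRange ((n : Int) - 1) (-1) (-1)) =
      (match PySem.List.max? ((digitsOf s.toList).filter (fun x => x < (n : Int)))
          (fun x => x) with
       | some m => some (i * 10 + m)
       | none => none) := by
  intro n
  induction n with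
  | zero =>
    intro _
    rw [show ((0:Nat):Int) - 1 = -1 by norm_num, PySem.List.pyRange_neg_one_eq_nil le_rfl]
    have hf : (digitsOf s.toList).filter (fun x => decide (x < ((0:Nat):Int))) = [] := by
      rw [List.filter_eq_nil_iff]
      intro x hx
      have := digitsOf_bounds s.toList x hx
      simp only [decide_eq_true_iff]
      omega
    rw [hf]
    rfl
  | succ n ih =>
    intro hn
    have hn9 : ((n:Int)) ≤ 9 := by exact_mod_cast by omega
    have hn0 : (0:Int) ≤ (n:Int) := by positivity
    rw [show ((n+1:Nat):Int) - 1 = (n:Int) by push_cast; ring]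
    rw [PySem.List.pyRange_neg_one_cons (by omega : (-1:Int) < (n:Int))]
    show (if PySem.Str.find s (PySem.Int.toStr (n:Int)) ≠ -1 then
      PySem.Int.ofStr? (PySem.Int.toStr i ++ PySem.Int.toStr (n:Int))
    else bankInner s i (PySem.List.pyRange ((n:Int) - 1) (-1) (-1))) = _
    rw [PySem.Str.find_eq]
    rw [show (PySem.Int.toStr (n:Int)).toList = [dchar (n:Int)] from toStr_digit _ hn0 hn9]
    rw [find_singleton]
    cases hf : s.toList.findIdx? (· == dchar (n:Int)) with
    | none =>
      have hne : (n:Int) ∉ digitsOf s.toList := by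
        rw [mem_digitsOf _ hn0 hn9]
        exact fIdx_none _ _ hf
      rw [if_neg (by simp)]
      rw [ih (by omega)]
      have hfilter : (digitsOf s.toList).filter (fun x => decide (x < ((n+1:Nat):Int))) =
          (digitsOf s.toList).filter (fun x => decide (x < ((n:Nat):Int))) := by
        apply List.filter_congr
        intro x hx
        have hb := digitsOf_bounds s.toList x hx
        have hxn : x ≠ (n:Int) := fun h => hne (h ▸ hx)
        simp only [decide_eq_decide]
        push_cast
        omega
      rw [hfilter]
    | some k =>
      rw [if_pos (by simp)]
      rw [ofStr_two i (n:Int) hi0 hi9 hn0 hn9]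
      have hmem : (n:Int) ∈ digitsOf s.toList := by
        rw [mem_digitsOf _ hn0 hn9]
        obtain ⟨hk, hc⟩ := fIdx_some _ _ _ hf
        exact hc ▸ List.getElem_mem hk
      have hmax : PySem.List.max? ((digitsOf s.toList).filter
          (fun x => decide (x < ((n+1:Nat):Int)))) (fun x => x) = some (n:Int) := by
        apply max?_unique
        · rw [List.mem_filter]
          refine ⟨hmem, by simp⟩
        · intro x hx
          rw [List.mem_filter] at hx
          have := hx.2
          simp only [decide_eq_true_iff] at this
          push_cast at this
          omega
      rw [hmax]


lemma lastIdx_eq_none (cs : List Char) (h : cs.reverse.findIdx? isDig = none) :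
    lastIdx cs = -1 := by
  unfold lastIdx; rw [h]

lemma lastIdx_eq_some (cs : List Char) (j : Nat) (h : cs.reverse.findIdx? isDig = some j) :
    lastIdx cs = (cs.length : Int) - 1 - j := by
  unfold lastIdx; rw [h]

lemma lastIdx_le (cs : List Char) : lastIdx cs ≤ (cs.length : Int) - 1 := by
  cases h : cs.reverse.findIdx? isDig with
  | none =>
    rw [lastIdx_eq_none cs h]
    have : (0:Int) ≤ (cs.length : Int) := by positivity
    omega
  | some j => rw [lastIdx_eq_some cs j h]; omega


lemma lt_lastIdx (cs : List Char) (k : Nat) :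
    (k : Int) < lastIdx cs ↔ digitsOf (cs.drop (k + 1)) ≠ [] := by
  cases h : cs.reverse.findIdx? isDig with
  | none =>
    rw [lastIdx_eq_none cs h]
    rw [List.findIdx?_eq_none_iff] at h
    constructor
    · omega
    · intro hd
      exfalso
      rw [digitsOf_ne_nil] at hd
      obtain ⟨c, hc, hdig⟩ := hd
      have : c ∈ cs := List.mem_of_mem_drop hc
      have := h c (List.mem_reverse.mpr this)
      simp [hdig] at this
  | some j =>
    rw [lastIdx_eq_some cs j h]
    rw [List.findIdx?_eq_some_iff_getElem] at h
    obtain ⟨hj, hpj, hmin⟩ := h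
    rw [List.length_reverse] at hj
    have hrev : cs.reverse[j]'(by simpa using hj) = cs[cs.length - 1 - j]'(by omega) := by
      rw [List.getElem_reverse]
    constructor
    · intro hk
      rw [digitsOf_ne_nil]
      refine ⟨cs[cs.length - 1 - j]'(by omega), ?_, by rw [← hrev]; simpa using hpj⟩
      have hL : k + 1 ≤ cs.length - 1 - j := by omega
      have : (cs.drop (k+1))[(cs.length - 1 - j) - (k+1)]'(by simp; omega) =
          cs[cs.length - 1 - j]'(by omega) := by
        rw [List.getElem_drop]
        congr 1
        omega
      rw [← this]
      exact List.getElem_mem _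
    · intro hd
      rw [digitsOf_ne_nil] at hd
      obtain ⟨c, hc, hdig⟩ := hd
      obtain ⟨m, hm, hcm⟩ := List.mem_iff_getElem.mp hc
      rw [List.getElem_drop] at hcm
      have hmlen : k + 1 + m < cs.length := by simp at hm; omega
      have hple : k + 1 + m ≤ cs.length - 1 - j := by
        by_contra hgt
        rw [Nat.not_le] at hgt
        have hi : cs.length - 1 - (k + 1 + m) < j := by omega
        have := hmin (cs.length - 1 - (k + 1 + m)) hi
        rw [List.getElem_reverse] at this
        have heq : cs.length - 1 - (cs.length - 1 - (k + 1 + m)) = k + 1 + m := by omega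
        simp only [heq] at this
        rw [hcm] at this
        simp [hdig] at this
      omega


lemma lastIdx_append_singleton (xs : List Char) (x : Char) :
    lastIdx (xs ++ [x]) = if isDig x then (xs.length : Int) else lastIdx xs := by
  have hrev : (xs ++ [x]).reverse = x :: xs.reverse := by simp
  cases hx : isDig x with
  | true =>
    have h : (xs ++ [x]).reverse.findIdx? isDig = some 0 := by
      rw [hrev, List.findIdx?_cons, hx]
      simp
    rw [lastIdx_eq_some _ 0 h, if_pos rfl]
    simp only [List.length_append, List.length_cons, List.length_nil]
    push_cast
    ring
  | false =>
    rw [if_neg (by simp)]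
    have h : (xs ++ [x]).reverse.findIdx? isDig = (xs.reverse.findIdx? isDig).map (· + 1) := by
      rw [hrev, List.findIdx?_cons, hx]
      rfl
    cases hf : xs.reverse.findIdx? isDig with
    | none =>
      rw [lastIdx_eq_none _ (by rw [h, hf]; rfl), lastIdx_eq_none _ hf]
    | some j =>
      rw [lastIdx_eq_some _ (j+1) (by rw [h, hf]; rfl), lastIdx_eq_some _ j hf]
      simp only [List.length_append, List.length_cons, List.length_nil]
      push_cast
      ring

lemma fIdx_append_singleton (d : Int) (xs : List Char) (x : Char) :
    fIdx d (xs ++ [x]) =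
      (fIdx d xs).or (if x == dchar d then some xs.length else none) := by
  unfold fIdx
  rw [List.findIdx?_append]
  congr 1
  cases hx : (x == dchar d) with
  | true => simp [List.findIdx?_cons, hx]
  | false => simp [List.findIdx?_cons, hx]

lemma scan_eq (cs : List Char) :
    (∀ d : Int, 0 ≤ d → d ≤ 9 →
      ((PySem.List.enumerate cs 0).foldl
        (fun (acc : PySem.Dict Int Int × Int) kc =>
          if '0' ≤ kc.2 ∧ kc.2 ≤ '9' then
            (if acc.1.contains ((kc.2.toNat : Int) - 48) then acc.1
             else acc.1.insert ((kc.2.toNat : Int) - 48) kc.1, kc.1)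
          else acc)
        (PySem.Dict.empty, -1)).1.get? d = Option.map (fun k : Nat => (k : Int)) (fIdx d cs)) ∧
    ((PySem.List.enumerate cs 0).foldl
        (fun (acc : PySem.Dict Int Int × Int) kc =>
          if '0' ≤ kc.2 ∧ kc.2 ≤ '9' then
            (if acc.1.contains ((kc.2.toNat : Int) - 48) then acc.1
             else acc.1.insert ((kc.2.toNat : Int) - 48) kc.1, kc.1)
          else acc)
        (PySem.Dict.empty, -1)).2 = lastIdx cs := by
  induction cs using List.reverseRecOn with
  | nil => exact ⟨fun d _ _ => rfl, rfl⟩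
  | append_singleton xs x ih =>
    obtain ⟨ihD, ihL⟩ := ih
    have hstep : PySem.List.enumerate (xs ++ [x]) 0 =
        PySem.List.enumerate xs 0 ++ [((xs.length : Int), x)] := by
      rw [PySem.List.enumerate_append]
      simp [PySem.List.enumerate]
    rw [hstep, List.foldl_append]
    simp only [List.foldl_cons, List.foldl_nil]
    constructor
    · intro d h0 h9
      split
      · next hx =>
        have hdig : isDig x = true := by simp [isDig, hx]
        have hd0 : dchar ((x.toNat : Int) - 48) = x := dchar_dval x hdig
        have hb0 := (isDig_iff x).mp hdig
        by_cases hdd : d = (x.toNat : Int) - 48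
        · subst hdd
          rw [PySem.Dict.contains_eq_isSome_get?, ihD _ (by omega) (by omega),
            fIdx_append_singleton]
          cases hfx : fIdx ((x.toNat : Int) - 48) xs with
          | some k =>
            rw [if_pos (by simp)]
            rw [ihD _ (by omega) (by omega), hfx]
            simp
          | none =>
            rw [if_neg (by simp)]
            rw [PySem.Dict.get?_insert_self]
            rw [if_pos (by rw [beq_iff_eq]; exact hd0.symm)]
            simp
        · have hxne : (x == dchar d) = false := by
            rw [beq_eq_false_iff_ne]
            intro hxd
            apply hdd
            rw [← dval_dchar d h0 h9, ← hxd]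
          rw [fIdx_append_singleton, hxne]
          simp only [Bool.false_eq_true, if_false, Option.or_none]
          split
          · exact ihD d h0 h9
          · rw [PySem.Dict.get?_insert_of_ne _ _ hdd]
            exact ihD d h0 h9
      · next hx =>
        have hdig : isDig x = false := by simp [isDig, hx]
        have hxne : (x == dchar d) = false := by
          rw [beq_eq_false_iff_ne]
          intro hxd
          have := isDig_dchar d h0 h9
          rw [← hxd, hdig] at this
          exact Bool.false_ne_true this
        rw [fIdx_append_singleton, hxne]
        simp only [Bool.false_eq_true, if_false, Option.or_none]
        exact ihD d h0 h9
    · split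
      · next hx =>
        have hdig : isDig x = true := by simp [isDig, hx]
        rw [lastIdx_append_singleton, if_pos hdig]
      · next hx =>
        have hdig : isDig x = false := by simp [isDig, hx]
        rw [lastIdx_append_singleton, if_neg (by simp [hdig])]
        exact ihL

lemma find_fIdx (cs : List Char) (d : Int) :
    PySem.Chars.find cs [dchar d] =
      (match fIdx d cs with
       | some k => (k : Int)
       | none => -1) :=
  find_singleton cs (dchar d)

lemma inner_eq10 (s : String) (i : Int) (hi0 : 0 ≤ i) (hi9 : i ≤ 9) :
    bankInner s i (PySem.List.pyRange 9 (-1) (-1)) =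
      (match PySem.List.max? (digitsOf s.toList) (fun x => x) with
       | some m => some (i * 10 + m)
       | none => none) := by
  have h := inner_eq s i hi0 hi9 10 le_rfl
  rw [show (((10:Nat):Int) - 1) = 9 by norm_num] at h
  rw [h]
  have hfull : (digitsOf s.toList).filter (fun x => decide (x < ((10:Nat):Int))) =
      digitsOf s.toList := by
    apply List.filter_eq_self.mpr
    intro x hx
    have := digitsOf_bounds s.toList x hx
    simp only [decide_eq_true_iff]
    push_cast
    omega
  rw [hfull]

lemma bankTens_cons_none (D : PySem.Dict Int Int) (last d : Int) (rest : List Int)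
    (h : D.get? d = none) :
    bankTens D last (d :: rest) = bankTens D last rest := by
  simp [bankTens, h]

lemma bankTens_cons_some (D : PySem.Dict Int Int) (last d k : Int) (rest : List Int)
    (h : D.get? d = some k) :
    bankTens D last (d :: rest) = if k < last then some d else bankTens D last rest := by
  simp [bankTens, h]

lemma slice_toList (line : String) (k : Nat) :
    (PySem.Str.slice line (some ((k : Int) + 1)) none).toList = line.toList.drop (k + 1) := by
  simp only [PySem.Str.slice, PySem.Chars.slice, String.toList_ofList]
  rw [PySem.List.slice_from line.toList (show (0:Int) ≤ (k:Int) + 1 by positivity)]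
  have h2 : ((k : Int) + 1).toNat = k + 1 := by omega
  rw [h2]

lemma loops_eq (line : String) (D : PySem.Dict Int Int) (last : Int)
    (hD : ∀ d : Int, 0 ≤ d → d ≤ 9 → D.get? d = Option.map (fun k : Nat => (k : Int)) (fIdx d line.toList))
    (hl : last = lastIdx line.toList) :
    ∀ ds : List Int, (∀ d ∈ ds, 0 ≤ d ∧ d ≤ 9) →
    bankOuter line ds =
      (match bankTens D last ds with
       | none => none
       | some t => bankUnits line D t) := by
  intro ds
  induction ds with
  | nil => intro _; rfl
  | cons d rest ih =>
    intro hmem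
    have h0 : 0 ≤ d := (hmem d (by simp)).1
    have h9 : d ≤ 9 := (hmem d (by simp)).2
    have ih' := ih (fun e he => hmem e (by simp [he]))
    have hDd := hD d h0 h9
    simp only [bankOuter]
    rw [PySem.Str.find_eq, toStr_digit d h0 h9, find_fIdx, PySem.Str.len_eq]
    cases hf : fIdx d line.toList with
    | none =>
      have hget : D.get? d = none := by rw [hDd, hf]; rfl
      rw [bankTens_cons_none D last d rest hget]
      simp only []
      rw [if_neg (by simp)]
      exact ih'
    | some k =>
      have hget : D.get? d = some (k : Int) := by rw [hDd, hf]; rfl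
      rw [bankTens_cons_some D last d (k : Int) rest hget]
      simp only []
      by_cases hkl : (k : Int) = (line.toList.length : Int) - 1
      · rw [if_neg (by simp [hkl])]
        have hlast : ¬ ((k : Int) < last) := by
          have := lastIdx_le line.toList
          rw [hl]
          omega
        rw [if_neg hlast]
        exact ih'
      · rw [if_pos ⟨by simp, hkl⟩]
        rw [inner_eq10 _ d h0 h9, slice_toList line k]
        by_cases hdig : digitsOf (line.toList.drop (k + 1)) = []
        · have hmax : PySem.List.max? (digitsOf (line.toList.drop (k + 1))) (fun x => x) = none :=
            (PySem.List.max?_eq_none_iff _ _).mpr hdig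
          rw [hmax]
          have hlast : ¬ ((k : Int) < last) := by
            rw [hl, lt_lastIdx]
            simpa using hdig
          rw [if_neg hlast]
          simp only []
          exact ih'
        · have hlast : (k : Int) < last := by
            rw [hl, lt_lastIdx]
            exact hdig
          rw [if_pos hlast]
          cases hmax : PySem.List.max? (digitsOf (line.toList.drop (k + 1))) (fun x => x) with
          | none => exact absurd ((PySem.List.max?_eq_none_iff _ _).mp hmax) hdig
          | some u =>
            simp only []
            rw [bankUnits, hget]
            simp only []
            rw [slice_toList line k]
            have hdig_eq : ((line.toList.drop (k + 1)).filter
                (fun c => decide ('0' ≤ c ∧ c ≤ '9'))).map (fun c => ((c.toNat : Int) - 48)) =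
                digitsOf (line.toList.drop (k + 1)) := rfl
            rw [hdig_eq, hmax]


-- ===== VERDICT (by name: the statement is the Claim_ definition above) =====
theorem bank_spec : Claim_equal_bank := by
  intro line _
  show bank line = bank_alt line
  obtain ⟨hD, hl⟩ := scan_eq line.toList
  exact loops_eq line _ _ hD hl (PySem.List.pyRange 9 (-1) (-1)) (by decide)
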